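-- pv_equiv track=rewrite | github.com/YashRautela05/Project-3 | Crime-AI/backend/utils.py | _format_detections_summary
-- ===== SOURCE A (Python) =====
-- from typing import Any, Dict, List
--
-- def _format_detections_summary(detections: List[Dict]) -> str:
--     """Summarize object detections."""
--     all_labels = []
--     for det in detections:
--         all_labels.extend([obj.get("label") for obj in det.get("objects", [])])
--
--     if not all_labels:
--         return "None"
--
--     from collections import Counter
--     counts = Counter(all_labels)
--     top_objects = counts.most_common(10)
--     return ", ".join([f"{label} ({count})" for label, count in top_objects])
-- ===== SOURCE B (Python) =====
-- from typing import Any, Dict, List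
--
-- def _format_detections_summary(detections: List[Dict]) -> str:
--     """Summarize object detections: dedup labels in first-seen order, count each by
--     list.count, then pick the top 10 by repeated extraction of the first maximal pair
--     (partial selection, no sort, no Counter)."""
--     labels = [obj.get("label") for det in detections for obj in det.get("objects", [])]
--     if not labels:
--         return "None"
--     pairs = [(l, labels.count(l)) for l in dict.fromkeys(labels)]
--     parts = []
--     while pairs and len(parts) < 10:
--         best = max(pairs, key=lambda kv: kv[1])
--         pairs.remove(best)
--         parts.append(f"{best[0]} ({best[1]})")
--     return ", ".join(parts)
-- ===== Notes on version B (the rewrite author's own statement) =====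
-- stated objective: alternative
-- what changed: B eliminates Counter and most_common's heap/sort entirely: it dedups the flat label list in first-seen order, counts each distinct label with list.count, and picks the top 10 by a selection loop that repeatedly extracts the first maximal (label,count) pair and removes it.
import Mathlib
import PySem

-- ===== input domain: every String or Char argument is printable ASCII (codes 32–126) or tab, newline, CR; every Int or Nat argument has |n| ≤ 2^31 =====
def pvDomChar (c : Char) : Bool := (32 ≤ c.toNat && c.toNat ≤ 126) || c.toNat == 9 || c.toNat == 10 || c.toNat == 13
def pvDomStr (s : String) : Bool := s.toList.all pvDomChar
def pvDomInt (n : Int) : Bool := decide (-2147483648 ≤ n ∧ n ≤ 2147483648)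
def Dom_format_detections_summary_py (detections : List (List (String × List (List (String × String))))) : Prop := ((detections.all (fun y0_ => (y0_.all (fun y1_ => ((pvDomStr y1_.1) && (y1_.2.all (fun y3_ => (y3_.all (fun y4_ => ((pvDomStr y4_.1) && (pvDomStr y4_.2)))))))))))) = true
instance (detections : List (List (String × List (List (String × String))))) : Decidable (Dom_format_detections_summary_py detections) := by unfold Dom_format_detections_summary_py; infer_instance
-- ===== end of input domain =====

-- B replaces Counter + most_common(10) by first-seen dedup, per-label list.count, and a
-- selection loop that repeatedly extracts the first maximal pair (no Counter, no sort);
-- objective: alternative (B trades hashing/sorting for repeated scans).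

-- ===== PORT A =====
-- all_labels collected by extending with [obj.get("label") for obj in det.get("objects", [])];
-- Counter(all_labels); most_common(10) = stable descending sort by count, first 10 (CPython's rule).
def format_detections_summary_py (detections : List (List (String × List (List (String × String))))) : String :=
  let all_labels : List (Option String) :=
    detections.foldl (fun acc det =>
      acc ++ ((PySem.Dict.mk det).getD "objects" []).map (fun obj => (PySem.Dict.mk obj).get? "label")) []
  if all_labels = [] then "None"
  else
    let counts := PySem.Dict.counter all_labels
    let top_objects := (PySem.List.sorted counts.items (fun kv => kv.2) true).take 10
    PySem.Str.join ", " (top_objects.map (fun kv =>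
      (match kv.1 with | some s => s | none => "None") ++ " (" ++ PySem.Int.toStr kv.2 ++ ")"))

-- ===== PORT B =====
-- while pairs and len(parts) < 10: best = max(pairs, key=count); pairs.remove(best); append format.
-- Fuel = 10 - len(parts); the remove? none branch is an unreachable totality guard (best ∈ pairs).
def selTopB : Nat → List (Option String × Int) → List String
  | 0, _ => []
  | Nat.succ n, pairs =>
    match PySem.List.max? pairs (fun kv => kv.2) with
    | none => []
    | some best =>
      match PySem.List.remove? pairs best with
      | none => []
      | some rest =>
        ((match best.1 with | some s => s | none => "None") ++ " (" ++ PySem.Int.toStr best.2 ++ ")")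
          :: selTopB n rest

-- labels by flat comprehension; pairs = [(l, labels.count(l)) for l in dict.fromkeys(labels)].
def format_detections_summary_py_alt (detections : List (List (String × List (List (String × String))))) : String :=
  let labels : List (Option String) :=
    detections.flatMap (fun det =>
      ((PySem.Dict.mk det).getD "objects" []).map (fun obj => (PySem.Dict.mk obj).get? "label"))
  if labels = [] then "None"
  else
    let pairs := (PySem.List.dedup labels).map (fun l => (l, (PySem.List.count labels l : Int)))
    PySem.Str.join ", " (selTopB 10 pairs)

-- ===== PRECONDITION & SPEC =====
def Spec_format_detections_summary_py (detections : List (List (String × List (List (String × String))))) (out : String) : Prop := out = format_detections_summary_py_alt detections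
instance (detections : List (List (String × List (List (String × String))))) (out : String) : Decidable (Spec_format_detections_summary_py detections out) := by unfold Spec_format_detections_summary_py; infer_instance

-- ===== CLAIM (what is proved, stated in full; the proofs are below) =====
def Claim_equal_format_detections_summary_py : Prop := ∀ (detections : List (List (String × List (List (String × String))))), Dom_format_detections_summary_py detections → Spec_format_detections_summary_py detections (format_detections_summary_py detections)

-- ===== LEMMAS AND PROOFS =====

-- max over xs ++ [x]: keep the earlier maximum on ties (first extremal).
def pvMaxStep {α : Type} (key : α → Int) (acc : Option α) (y : α) : Option α :=
  match acc with
  | none => some y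
  | some m => if key m < key y then some y else some m

theorem max?_eq_foldl {α : Type} (xs : List α) (key : α → Int) :
    PySem.List.max? xs key = xs.foldl (pvMaxStep key) none := rfl

theorem max?_snoc {α : Type} (xs : List α) (x : α) (key : α → Int) :
    PySem.List.max? (xs ++ [x]) key
      = some (match PySem.List.max? xs key with
              | none => x
              | some m => if key m < key x then x else m) := by
  rw [max?_eq_foldl, max?_eq_foldl, List.foldl_append, List.foldl_cons, List.foldl_nil]
  cases xs.foldl (pvMaxStep key) none with
  | none => rfl
  | some m => simp only [pvMaxStep]; split <;> rfl

theorem sorted_rev_snoc {α : Type} (xs : List α) (x : α) (key : α → Int) :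
    PySem.List.sorted (xs ++ [x]) key true
      = PySem.List.insertBy (fun a b => decide (key b < key a)) x (PySem.List.sorted xs key true) := by
  rw [PySem.List.sorted_rev_eq_foldl_insertBy, PySem.List.sorted_rev_eq_foldl_insertBy,
    List.foldl_append, List.foldl_cons, List.foldl_nil]

-- stable descending sort = first maximal element, then stable sort of the rest
theorem sorted_rev_eq_max_cons {α : Type} [BEq α] [LawfulBEq α] (xs : List α) (key : α → Int)
    (m : α) (h : PySem.List.max? xs key = some m) :
    PySem.List.sorted xs key true = m :: PySem.List.sorted (xs.erase m) key true := by
  induction xs using List.reverseRecOn generalizing m with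
  | nil => simp [PySem.List.max?] at h
  | append_singleton xs x ih =>
    rw [max?_snoc] at h
    cases hm : PySem.List.max? xs key with
    | none =>
      have hxs : xs = [] := (PySem.List.max?_eq_none_iff xs key).1 hm
      subst hxs
      rw [hm] at h
      injection h with h
      subst h
      simp [PySem.List.sorted, PySem.List.insertBy]
    | some m0 =>
      rw [hm] at h
      have h' : (if key m0 < key x then x else m0) = m := Option.some.inj h
      by_cases hlt : key m0 < key x
      · rw [if_pos hlt] at h'
        subst h'
        have hnotmem : x ∉ xs := by
          intro hmem
          have := PySem.List.max?_isMax hm x hmem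
          omega
        rw [List.erase_append_right _ hnotmem]
        simp only [List.erase_cons_head, List.append_nil]
        rw [sorted_rev_snoc]
        cases hs : PySem.List.sorted xs key true with
        | nil => simp [PySem.List.insertBy]
        | cons h0 t =>
          have hh0 : h0 ∈ xs := by
            have : h0 ∈ PySem.List.sorted xs key true := by rw [hs]; exact List.mem_cons_self
            exact (PySem.List.mem_sorted _ _ _ _).1 this
          have : key h0 ≤ key m0 := PySem.List.max?_isMax hm h0 hh0
          simp only [PySem.List.insertBy]
          rw [if_pos (by simp; omega)]
      · rw [if_neg hlt] at h'
        subst h'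
        have hmem : m0 ∈ xs := PySem.List.max?_mem hm
        rw [List.erase_append_left _ hmem]
        rw [sorted_rev_snoc, ih m0 hm]
        simp only [PySem.List.insertBy]
        rw [if_neg (by simp; omega)]
        rw [sorted_rev_snoc]

-- the selection loop computes exactly the formatted first n of the stable descending sort
theorem selTopB_eq_sorted_take (n : Nat) (pairs : List (Option String × Int)) :
    selTopB n pairs
      = ((PySem.List.sorted pairs (fun kv => kv.2) true).take n).map (fun kv =>
          (match kv.1 with | some s => s | none => "None") ++ " (" ++ PySem.Int.toStr kv.2 ++ ")") := by
  induction n generalizing pairs with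
  | zero => simp [selTopB]
  | succ n ih =>
    cases hm : PySem.List.max? pairs (fun kv => kv.2) with
    | none =>
      have : pairs = [] := (PySem.List.max?_eq_none_iff _ _).1 hm
      subst this
      simp [selTopB, PySem.List.sorted, PySem.List.max?]
    | some best =>
      have hmem : best ∈ pairs := PySem.List.max?_mem hm
      have hrem := PySem.List.remove?_eq_some_erase pairs best hmem
      rw [sorted_rev_eq_max_cons pairs _ best hm]
      simp only [selTopB, hm, hrem, List.take_succ_cons, List.map_cons]
      rw [ih]

-- ===== VERDICT (by name: the statement is the Claim_ definition above) =====
theorem format_detections_summary_py_spec : Claim_equal_format_detections_summary_py := by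
  intro detections _
  unfold Spec_format_detections_summary_py format_detections_summary_py format_detections_summary_py_alt
  have hall : (detections.foldl (fun acc det =>
      acc ++ ((PySem.Dict.mk det).getD "objects" []).map (fun obj => (PySem.Dict.mk obj).get? "label")) [])
      = detections.flatMap (fun det => ((PySem.Dict.mk det).getD "objects" []).map (fun obj => (PySem.Dict.mk obj).get? "label")) := by
    rw [PySem.List.foldl_append_eq_flatMap]; rfl
  simp only [hall]
  set L := detections.flatMap (fun det => ((PySem.Dict.mk det).getD "objects" []).map (fun obj => (PySem.Dict.mk obj).get? "label")) with hL
  by_cases h : L = []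
  · rw [if_pos h, if_pos h]
  · rw [if_neg h, if_neg h]
    have hpairs : (PySem.List.dedup L).map (fun l => (l, (PySem.List.count L l : Int)))
        = (PySem.Dict.counter L).items := by
      rw [PySem.Dict.items_counter]
      simp [PySem.List.dedup_eq_ofList, PySem.List.count_eq]
    rw [hpairs, selTopB_eq_sorted_take]
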